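-- pv_equiv track=rewrite | github.com/oozdal/python-interview-challenge | apple_distribution.py | find_boxes
-- ===== SOURCE A (Python) =====
-- def find_boxes(apples: list, boxes: list) -> int:
--     total_apples = sum(apples)
--     boxes.sort(reverse=True)
--
--     number_of_boxes = 1
--
--     for box in boxes:
--         if total_apples <= box:
--             total_apples -= box
--         else:
--             number_of_boxes += 1
--             total_apples -= box
--
--     return number_of_boxes
-- ===== SOURCE B (Python) =====
-- def find_boxes(apples: list, boxes: list) -> int:
--     boxes.sort(reverse=True)  # same in-place sort as A
--     total = sum(apples)
--     prefix = []
--     s = 0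
--     for b in boxes:
--         s += b
--         prefix.append(s)
--     return 1 + sum(1 for p in prefix if p < total)
-- ===== Notes on version B (the rewrite author's own statement) =====
-- stated objective: alternative
-- what changed: Replaces A's running-subtraction loop with a prefix-sum table: B builds the cumulative sums of the sorted boxes and returns 1 plus the count of cumulative sums strictly below the apple total.
import Mathlib
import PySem

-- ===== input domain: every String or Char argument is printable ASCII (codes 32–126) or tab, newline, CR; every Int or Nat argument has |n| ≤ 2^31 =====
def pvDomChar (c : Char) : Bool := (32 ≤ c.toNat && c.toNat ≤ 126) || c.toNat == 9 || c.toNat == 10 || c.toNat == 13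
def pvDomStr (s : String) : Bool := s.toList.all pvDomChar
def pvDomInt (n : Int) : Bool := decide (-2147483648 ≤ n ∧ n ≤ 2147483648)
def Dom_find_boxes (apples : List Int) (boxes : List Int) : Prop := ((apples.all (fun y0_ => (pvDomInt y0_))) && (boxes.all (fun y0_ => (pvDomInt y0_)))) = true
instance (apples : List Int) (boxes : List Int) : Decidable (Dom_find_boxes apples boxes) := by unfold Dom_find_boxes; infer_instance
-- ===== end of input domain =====

-- B replaces A's running-subtraction loop by a prefix-sum table and a count pass (objective: alternative).
-- Both Pythons sort `boxes` in place (same mutation); the equivalence proved here is about the return value.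

-- ===== PORT A =====
def find_boxes (apples : List Int) (boxes : List Int) : Int :=
  let total_apples := apples.sum
  let sortedBoxes := PySem.List.sorted boxes (fun x => x) true   -- boxes.sort(reverse=True)
  (sortedBoxes.foldl
    (fun (st : Int × Int) box =>
      if st.1 ≤ box then (st.1 - box, st.2)
      else (st.1 - box, st.2 + 1))
    (total_apples, 1)).2

-- ===== PORT B =====
-- the prefix loop of Source B: running sum s, appending each cumulative sum
def pvPrefix : List Int → Int → List Int
  | [], _ => []
  | b :: r, s => (s + b) :: pvPrefix r (s + b)

def find_boxes_alt (apples : List Int) (boxes : List Int) : Int :=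
  let sortedBoxes := PySem.List.sorted boxes (fun x => x) true   -- boxes.sort(reverse=True)
  let total := apples.sum
  1 + ((pvPrefix sortedBoxes 0).countP (fun p => p < total) : Int)

-- ===== PRECONDITION & SPEC =====
def Spec_find_boxes (apples : List Int) (boxes : List Int) (out : Int) : Prop := out = find_boxes_alt apples boxes
instance (apples : List Int) (boxes : List Int) (out : Int) : Decidable (Spec_find_boxes apples boxes out) := by unfold Spec_find_boxes; infer_instance

-- ===== CLAIM (what is proved, stated in full; the proofs are below) =====
def Claim_equal_find_boxes : Prop := ∀ (apples : List Int) (boxes : List Int), Dom_find_boxes apples boxes → Spec_find_boxes apples boxes (find_boxes apples boxes)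

-- ===== LEMMAS AND PROOFS =====

lemma pvPrefix_shift (l : List Int) (s : Int) :
    pvPrefix l s = (pvPrefix l 0).map (fun p => s + p) := by
  induction l generalizing s with
  | nil => simp [pvPrefix]
  | cons b r ih =>
      simp only [pvPrefix]
      rw [ih (s + b), ih (0 + b)]
      simp [List.map_map]

-- the loop invariant: A's counter equals the initial counter plus the number of
-- cumulative prefix sums strictly below the running total
lemma loop_eq_count (l : List Int) (t c : Int) :
    (l.foldl
      (fun (st : Int × Int) box =>
        if st.1 ≤ box then (st.1 - box, st.2)
        else (st.1 - box, st.2 + 1))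
      (t, c)).2
    = c + ((pvPrefix l 0).countP (fun p => p < t) : Int) := by
  induction l generalizing t c with
  | nil => simp [pvPrefix]
  | cons b r ih =>
      simp only [List.foldl_cons, pvPrefix, zero_add]
      rw [pvPrefix_shift r b]
      have hcnt : ((pvPrefix r 0).map (fun p => b + p)).countP (fun p => p < t)
          = (pvPrefix r 0).countP (fun p => p < t - b) := by
        rw [List.countP_map]
        apply List.countP_congr
        intro p _
        simp only [Function.comp]
        constructor <;> (intro h; simp_all; omega)
      by_cases hle : t ≤ b
      · rw [if_pos hle, ih]
        have hb : ¬ (b < t) := by omega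
        simp [hb, hcnt]
      · rw [if_neg hle, ih]
        have hb : b < t := by omega
        simp [hb, hcnt]
        ring

-- ===== VERDICT (by name: the statement is the Claim_ definition above) =====
theorem find_boxes_spec : Claim_equal_find_boxes := by
  intro apples boxes _
  unfold Spec_find_boxes find_boxes find_boxes_alt
  simp only []
  rw [loop_eq_count]
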